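-- pv_equiv track=rewrite | github.com/siawayforward/we-talkin-bout-practice | interview-practice/kitty_calculations_on_tree.py | kittys_calculation
-- ===== SOURCE A (Python) =====
-- from itertools import combinations
-- from math import prod
--
-- def kittys_calculation(edges, queries):
--     result = 0
--     # get the pairs that can be made from the query
--     pairs = [list(p) for p in list(combinations(queries, 2))]
--
--     # check distance between each of the queries for each edge pair
--     # how many array do you have to get through to find both numbers after you find the first one?
--     for p in pairs:
--         start = [edges.index(e) for e in edges if p[0] in e][0]
--         ct = 0 #start tracking how far we have to go to find the second edge in the pair
--         for e in edges[start:]: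
--             while p[1] not in e:
--                 ct += 1
--                 break
--             # append distance to the end of the pair
--         p.append(ct)
--         # with distances, find the product of the pair and distance and sum them
--         result += prod(p)
--     return result
-- ===== SOURCE B (Python) =====
-- def kittys_calculation(edges, queries):
--     n = len(edges)
--     # one pass: first edge index containing each value
--     first = {}
--     for i, e in enumerate(edges):
--         for v in e:
--             if v not in first:
--                 first[v] = i
--     # per distinct query value b: counts[i] = number of edges k >= i lacking b
--     sufmiss = {}
--     for b in set(queries):
--         counts = [0] * (n + 1)
--         for i in range(n - 1, -1, -1):
--             counts[i] = counts[i + 1] + (0 if b in edges[i] else 1)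
--         sufmiss[b] = counts
--     total = 0
--     rest = list(queries)
--     while rest:
--         a = rest.pop(0)
--         for b in rest:
--             total += a * b * sufmiss[b][first[a]]
--     return total
-- ===== Notes on version B (the rewrite author's own statement) =====
-- stated objective: faster
-- what changed: B precomputes in one pass a dict of each value's first edge index and, per distinct query value, a suffix array of counts of edges lacking it, so each pair is handled by O(1) lookups instead of A's per-pair O(E^2) index-comprehension scan and O(E) suffix scan.
import Mathlib
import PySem

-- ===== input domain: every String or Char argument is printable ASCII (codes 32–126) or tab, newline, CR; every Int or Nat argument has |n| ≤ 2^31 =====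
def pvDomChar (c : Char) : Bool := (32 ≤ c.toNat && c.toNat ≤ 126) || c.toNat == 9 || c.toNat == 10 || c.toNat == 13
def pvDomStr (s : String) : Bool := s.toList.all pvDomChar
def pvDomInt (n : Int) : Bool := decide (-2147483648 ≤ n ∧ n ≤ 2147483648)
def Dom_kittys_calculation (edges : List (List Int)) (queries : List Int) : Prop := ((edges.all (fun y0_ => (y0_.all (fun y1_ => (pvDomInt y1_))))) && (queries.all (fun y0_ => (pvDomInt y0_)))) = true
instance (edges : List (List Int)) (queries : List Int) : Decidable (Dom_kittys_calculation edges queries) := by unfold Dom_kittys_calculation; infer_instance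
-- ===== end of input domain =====

-- B replaces A's per-pair O(E^2) index-comprehension and suffix scan by a one-pass
-- first-index dict plus per-query-value suffix-miss arrays; equivalence of return values.

-- ===== PORT A =====
-- combinations(queries, 2), each pair as a 2-element list
def pvCombos : List Int → List (List Int)
  | [] => []
  | x :: xs => xs.map (fun y => [x, y]) ++ pvCombos xs

-- [edges.index(e) for e in edges if p0 in e][0]; the [0] is IndexError (excluded by Pre_)
-- when no edge contains p0; edges.index(e) always succeeds (e is drawn from edges), so getD 0
def pvStartA (edges : List (List Int)) (p0 : Int) : Int :=
  let idxs : List Int :=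
    (edges.filter (fun e => decide (p0 ∈ e))).map
      (fun e => ((PySem.List.index? edges e).map (Int.ofNat)).getD 0)
  (PySem.List.pyGet? idxs 0).getD 0

-- for e in edges[start:]: while p1 not in e: ct += 1; break
def pvCtA (edges : List (List Int)) (start p1 : Int) : Int :=
  (PySem.List.slice edges (some start) none).foldl
    (fun ct e => if p1 ∈ e then ct else ct + 1) 0

def kittys_calculation (edges : List (List Int)) (queries : List Int) : Int :=
  (pvCombos queries).foldl (fun result p =>
    let p0 := (PySem.List.pyGet? p 0).getD 0
    let p1 := (PySem.List.pyGet? p 1).getD 0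
    let ct := pvCtA edges (pvStartA edges p0) p1
    result + (p ++ [ct]).foldl (· * ·) 1) 0

-- ===== PORT B =====
-- inner 'for v in e: if v not in first: first[v] = i'
def pvFirstInner (d : PySem.Dict Int Int) (i : Int) (e : List Int) : PySem.Dict Int Int :=
  e.foldl (fun d v => if (d.get? v).isSome then d else d.insert v i) d

-- for i, e in enumerate(edges): …
def pvFirstB (edges : List (List Int)) : PySem.Dict Int Int :=
  (PySem.List.enumerate edges 0).foldl (fun d p => pvFirstInner d p.1 p.2) PySem.Dict.empty

-- the Python fills counts[n], counts[n-1], …, counts[0] back-to-front;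
-- this structural recursion produces the identical array (counts[i] = counts[i+1] + miss_i)
def pvCountsB (edges : List (List Int)) (b : Int) : List Int :=
  match edges with
  | [] => [0]
  | e :: es =>
      let c := pvCountsB es b
      (c.headD 0 + (if b ∈ e then 0 else 1)) :: c

-- for b in set(queries): sufmiss[b] = counts
def pvSufB (edges : List (List Int)) (queries : List Int) : PySem.Dict Int (List Int) :=
  (PySem.Set.ofList queries).foldl (fun d b => d.insert b (pvCountsB edges b)) PySem.Dict.empty

-- while rest: a = rest.pop(0); for b in rest: total += a*b*sufmiss[b][first[a]]
-- first[a] is KeyError when a is in no edge (excluded by Pre_), hence getD/pyGet? defaults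
def pvLoopB (edges : List (List Int)) (first : PySem.Dict Int Int)
    (suf : PySem.Dict Int (List Int)) : List Int → Int → Int
  | [], total => total
  | a :: rest, total =>
      pvLoopB edges first suf rest
        (rest.foldl (fun t b =>
          t + a * b * (PySem.List.pyGet? (suf.getD b []) (first.getD a 0)).getD 0) total)

def kittys_calculation_alt (edges : List (List Int)) (queries : List Int) : Int :=
  pvLoopB edges (pvFirstB edges) (pvSufB edges queries) queries 0

-- ===== PRECONDITION & SPEC =====
-- Pre_ excludes exactly the inputs where Python A raises IndexError (and B a KeyError):
-- some query value that starts a pair (i.e. any but the last query) occurs in no edge.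
def Pre_kittys_calculation (edges : List (List Int)) (queries : List Int) : Prop :=
  ∀ q ∈ queries.dropLast, ∃ e ∈ edges, q ∈ e
instance (edges : List (List Int)) (queries : List Int) : Decidable (Pre_kittys_calculation edges queries) := by
  unfold Pre_kittys_calculation; infer_instance
def pvWitness_kittys_calculation : List (List Int) × List Int := ([[1, 2], [3]], [1, 3])
def Spec_kittys_calculation (edges : List (List Int)) (queries : List Int) (out : Int) : Prop := out = kittys_calculation_alt edges queries
instance (edges : List (List Int)) (queries : List Int) (out : Int) : Decidable (Spec_kittys_calculation edges queries out) := by unfold Spec_kittys_calculation; infer_instance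

-- ===== CLAIM (what is proved, stated in full; the proofs are below) =====
def Claim_equal_kittys_calculation : Prop := ∀ (edges : List (List Int)) (queries : List Int), Dom_kittys_calculation edges queries → Pre_kittys_calculation edges queries → Spec_kittys_calculation edges queries (kittys_calculation edges queries)

-- ===== LEMMAS AND PROOFS =====
-- shared mathematical description of the per-pair value
def pvStart (edges : List (List Int)) (a : Int) : Nat :=
  edges.findIdx (fun e => decide (a ∈ e))
def pvMiss (edges : List (List Int)) (a b : Int) : Int :=
  ((edges.drop (pvStart edges a)).countP (fun e => decide (b ∉ e)) : Int)
def pvSpecSum (edges : List (List Int)) : List Int → Int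
  | [] => 0
  | a :: rest => (rest.map (fun b => a * b * pvMiss edges a b)).sum + pvSpecSum edges rest

theorem startA_found (edges : List (List Int)) (a : Int)
    (h : ∃ e ∈ edges, a ∈ e) :
    pvStartA edges a = Int.ofNat (pvStart edges a) := by
  induction edges with
  | nil => simp at h
  | cons e es ih =>
    by_cases ha : a ∈ e
    · simp [pvStartA, pvStart, List.filter_cons, ha, List.findIdx_cons,
        List.idxOf?_cons, PySem.List.pyGet?_zero_cons]
    · have h' : ∃ e' ∈ es, a ∈ e' := by
        rcases h with ⟨e', he', hae⟩
        rcases List.mem_cons.mp he' with rfl | h2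
        · exact absurd hae ha
        · exact ⟨e', h2, hae⟩
      cases hf : es.filter (fun e => decide (a ∈ e)) with
      | nil =>
        exfalso
        rcases h' with ⟨e0, he0, hae0⟩
        have hm : e0 ∈ es.filter (fun e => decide (a ∈ e)) :=
          List.mem_filter.mpr ⟨he0, by simpa using hae0⟩
        rw [hf] at hm; simp at hm
      | cons e0 rest =>
        have he0f : e0 ∈ es.filter (fun e => decide (a ∈ e)) := by
          rw [hf]; exact List.mem_cons_self
        have he0 : e0 ∈ es := (List.mem_filter.mp he0f).1
        have hae0 : a ∈ e0 := by have := (List.mem_filter.mp he0f).2; simpa using this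
        have hne : e ≠ e0 := fun hq => ha (hq ▸ hae0)
        obtain ⟨k, hk⟩ : ∃ k, List.idxOf? e0 es = some k := by
          have hs : (List.idxOf? e0 es).isSome := by
            have := PySem.List.index?_isSome_iff (xs := es) (v := e0)
            rw [PySem.List.index?_eq_idxOf?] at this
            exact this.mpr he0
          exact Option.isSome_iff_exists.mp hs
        have ihv := ih h'
        have hes : pvStartA es a = Int.ofNat k := by
          simp [pvStartA, hf, hk, PySem.List.pyGet?_zero_cons]
        have hk' : pvStart es a = k := by
          rw [hes] at ihv
          have := ihv.symm
          simpa [Int.ofNat_inj] using this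
        have lhs : pvStartA (e :: es) a = Int.ofNat (k + 1) := by
          simp only [pvStartA]
          rw [List.filter_cons_of_neg (by simpa using ha), hf]
          simp [List.idxOf?_cons, hne, hk, PySem.List.pyGet?_zero_cons]
        rw [lhs]
        unfold pvStart at hk' ⊢
        rw [List.findIdx_cons]
        simp only [ha, decide_false, cond_false, hk']

theorem ctA_foldl (b : Int) :
    ∀ (l : List (List Int)) (acc : Int),
    l.foldl (fun ct e => if b ∈ e then ct else ct + 1) acc
      = acc + (l.countP (fun e => decide (b ∉ e)) : Int) := by
  intro l
  induction l with
  | nil => intro acc; simp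
  | cons e es ih =>
    intro acc
    by_cases hb : b ∈ e <;>
      simp [List.foldl_cons, List.countP_cons, hb, ih] <;> push_cast <;> ring

theorem ctA_eq (edges : List (List Int)) (s : Nat) (b : Int) :
    pvCtA edges ((s : Nat) : Int) b = ((edges.drop s).countP (fun e => decide (b ∉ e)) : Int) := by
  unfold pvCtA
  rw [PySem.List.slice_from_natCast, ctA_foldl]
  simp

theorem foldl_add_int (g : Int → Int) :
    ∀ (l : List Int) (init : Int),
    l.foldl (fun acc x => acc + g x) init = init + (l.map g).sum := by
  intro l
  induction l with
  | nil => intro init; simp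
  | cons x xs ih => intro init; simp [List.foldl_cons, ih]; ring

theorem A_eq_spec (edges : List (List Int)) :
    ∀ (qs : List Int) (init : Int), (∀ q ∈ qs.dropLast, ∃ e ∈ edges, q ∈ e) →
    (pvCombos qs).foldl (fun result p =>
      let p0 := (PySem.List.pyGet? p 0).getD 0
      let p1 := (PySem.List.pyGet? p 1).getD 0
      let ct := pvCtA edges (pvStartA edges p0) p1
      result + (p ++ [ct]).foldl (· * ·) 1) init = init + pvSpecSum edges qs := by
  intro qs
  induction qs with
  | nil => intro init _; simp [pvCombos, pvSpecSum]
  | cons a rest ih =>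
    intro init hpre
    cases rest with
    | nil => simp [pvCombos, pvSpecSum]
    | cons b0 rs =>
      have ha : ∃ e ∈ edges, a ∈ e := by
        apply hpre; rw [List.dropLast_cons_of_ne_nil (by simp)]; exact List.mem_cons_self
      have hrest : ∀ q ∈ (b0 :: rs).dropLast, ∃ e ∈ edges, q ∈ e := by
        intro q hq
        apply hpre
        rw [List.dropLast_cons_of_ne_nil (by simp)]
        exact List.mem_cons_of_mem _ hq
      show (List.foldl _ init ((b0 :: rs).map (fun y => [a, y]) ++ pvCombos (b0 :: rs))) = _
      rw [List.foldl_append, List.foldl_map, ih _ hrest]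
      have hper : ∀ (acc : Int) (y : Int),
          (fun result p =>
            let p0 := (PySem.List.pyGet? p 0).getD 0
            let p1 := (PySem.List.pyGet? p 1).getD 0
            let ct := pvCtA edges (pvStartA edges p0) p1
            result + (p ++ [ct]).foldl (· * ·) 1) acc [a, y]
            = acc + a * y * pvMiss edges a y := by
        intro acc y
        simp only [List.cons_append, List.nil_append, List.foldl_cons, List.foldl_nil,
          PySem.List.pyGet?_zero_cons]
        simp [PySem.List.pyGet?, PySem.List.pyIdx?, startA_found edges a ha, ctA_eq, pvMiss, pvStart]
      rw [show (fun (acc : Int) (y : Int) =>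
            (fun result p =>
              let p0 := (PySem.List.pyGet? p 0).getD 0
              let p1 := (PySem.List.pyGet? p 1).getD 0
              let ct := pvCtA edges (pvStartA edges p0) p1
              result + (p ++ [ct]).foldl (· * ·) 1) acc [a, y])
          = fun acc y => acc + a * y * pvMiss edges a y from funext fun acc => funext fun y => hper acc y]
      rw [foldl_add_int]
      simp [pvSpecSum]
      ring

theorem firstInner_get (e : List Int) (i : Int) (d : PySem.Dict Int Int) (a : Int) :
    (pvFirstInner d i e).get? a =
      match d.get? a with
      | some w => some w
      | none => if a ∈ e then some i else none := by
  induction e generalizing d with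
  | nil => cases hd : d.get? a <;> simp [pvFirstInner, hd]
  | cons v vs ih =>
    show (pvFirstInner (if (d.get? v).isSome then d else d.insert v i) i vs).get? a = _
    rw [ih]
    by_cases hav : a = v
    · subst hav
      cases hd : d.get? a with
      | some w => simp [hd]
      | none => simp [hd, PySem.Dict.get?_insert_self]
    · cases hd : d.get? a with
      | some w =>
        cases hv : d.get? v <;>
          simp [hd, PySem.Dict.get?_insert_of_ne _ _ hav, hv]
      | none =>
        cases hv : d.get? v <;>
          simp [hd, PySem.Dict.get?_insert_of_ne _ _ hav, hv, List.mem_cons, hav]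

theorem firstGo (es : List (List Int)) :
    ∀ (i : Int) (d : PySem.Dict Int Int) (a : Int),
    ((PySem.List.enumerate es i).foldl (fun d p => pvFirstInner d p.1 p.2) d).get? a =
      match d.get? a with
      | some w => some w
      | none =>
          if ∃ e ∈ es, a ∈ e then some (i + Int.ofNat (es.findIdx (fun e => decide (a ∈ e))))
          else none := by
  induction es with
  | nil => intro i d a; cases hd : d.get? a <;> simp [PySem.List.enumerate_nil, hd]
  | cons e es ih =>
    intro i d a
    rw [PySem.List.enumerate_cons]
    show ((PySem.List.enumerate es (i + 1)).foldl _ (pvFirstInner d i e)).get? a = _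
    rw [ih]
    rw [firstInner_get]
    cases hd : d.get? a with
    | some w => simp
    | none =>
      by_cases hae : a ∈ e
      · simp [hae, List.findIdx_cons]
      · simp only [hae, if_false]
        by_cases hex : ∃ e' ∈ es, a ∈ e'
        · have hex2 : ∃ e' ∈ e :: es, a ∈ e' := by
            rcases hex with ⟨e', he', h2⟩; exact ⟨e', List.mem_cons_of_mem _ he', h2⟩
          simp only [hex, hex2, if_true, List.findIdx_cons, hae, decide_false, cond_false]
          congr 1
          simp only [Int.ofNat_eq_natCast]
          push_cast
          ring
        · have hex2 : ¬ ∃ e' ∈ e :: es, a ∈ e' := by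
            rintro ⟨e', he', h2⟩
            rcases List.mem_cons.mp he' with rfl | hm
            · exact hae h2
            · exact hex ⟨e', hm, h2⟩
          simp [hex, hex2, hae]

theorem firstB_found (edges : List (List Int)) (a : Int)
    (h : ∃ e ∈ edges, a ∈ e) :
    (pvFirstB edges).getD a 0 = Int.ofNat (pvStart edges a) := by
  unfold pvFirstB PySem.Dict.getD
  rw [firstGo edges 0 PySem.Dict.empty a]
  simp [h, pvStart, PySem.Dict.empty, PySem.Dict.get?]

theorem counts_ne_nil (edges : List (List Int)) (b : Int) : pvCountsB edges b ≠ [] := by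
  cases edges <;> simp [pvCountsB]

theorem counts_getD (edges : List (List Int)) (b : Int) :
    ∀ s : Nat, s ≤ edges.length →
    (pvCountsB edges b).getD s 0 = ((edges.drop s).countP (fun e => decide (b ∉ e)) : Int) := by
  induction edges with
  | nil =>
    intro s hs
    have : s = 0 := Nat.le_zero.mp hs
    subst this
    simp [pvCountsB]
  | cons e es ih =>
    intro s hs
    cases s with
    | zero =>
      have hh : (pvCountsB es b).headD 0 = (pvCountsB es b).getD 0 0 := by
        cases hc : pvCountsB es b with
        | nil => exact absurd hc (counts_ne_nil es b)
        | cons c cs => simp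
      simp only [pvCountsB, List.getD_cons_zero, hh, ih 0 (Nat.zero_le _)]
      by_cases hb : b ∈ e <;> simp [hb, List.countP_cons]
    | succ s' =>
      simp only [pvCountsB, List.getD_cons_succ]
      rw [ih s' (by simpa using hs)]
      rfl

theorem suf_get (edges : List (List Int)) (l : List Int) :
    ∀ (d : PySem.Dict Int (List Int)) (b : Int),
    ((l.foldl (fun d b => d.insert b (pvCountsB edges b)) d).get? b) =
      if b ∈ l then some (pvCountsB edges b) else d.get? b := by
  induction l with
  | nil => intro d b; simp
  | cons x xs ih =>
    intro d b
    rw [List.foldl_cons, ih]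
    by_cases hbx : b = x
    · subst hbx
      by_cases hb : b ∈ xs <;> simp [hb, PySem.Dict.get?_insert_self]
    · by_cases hb : b ∈ xs <;>
        simp [hb, hbx, PySem.Dict.get?_insert_of_ne _ _ hbx]

theorem loopB_eq (edges : List (List Int)) (queries : List Int)
    (_hpre : ∀ q ∈ queries.dropLast, ∃ e ∈ edges, q ∈ e) :
    ∀ (rest : List Int) (total : Int), (∀ x ∈ rest, x ∈ queries) →
    (∀ q ∈ rest.dropLast, ∃ e ∈ edges, q ∈ e) →
    pvLoopB edges (pvFirstB edges) (pvSufB edges queries) rest total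
      = total + pvSpecSum edges rest := by
  intro rest
  induction rest with
  | nil => intro total _ _; simp [pvLoopB, pvSpecSum]
  | cons a rs ih =>
    intro total hsub hfound
    show pvLoopB edges (pvFirstB edges) (pvSufB edges queries) rs
        (rs.foldl (fun t b =>
          t + a * b * (PySem.List.pyGet?
            ((pvSufB edges queries).getD b []) ((pvFirstB edges).getD a 0)).getD 0) total)
      = total + pvSpecSum edges (a :: rs)
    have hsub' : ∀ x ∈ rs, x ∈ queries := fun x hx => hsub x (List.mem_cons_of_mem _ hx)
    have hfound' : ∀ q ∈ rs.dropLast, ∃ e ∈ edges, q ∈ e := by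
      intro q hq
      apply hfound
      cases rs with
      | nil => simp at hq
      | cons r rs' =>
        rw [List.dropLast_cons_of_ne_nil (by simp)]
        exact List.mem_cons_of_mem _ (by simpa using hq)
    have hstep : rs.foldl (fun t b =>
          t + a * b * (PySem.List.pyGet?
            ((pvSufB edges queries).getD b []) ((pvFirstB edges).getD a 0)).getD 0) total
        = total + (rs.map (fun b => a * b * pvMiss edges a b)).sum := by
      cases hrs : rs with
      | nil => simp
      | cons r rs' =>
        rw [← hrs]
        have hane : rs ≠ [] := by rw [hrs]; simp
        have ha : ∃ e ∈ edges, a ∈ e := by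
          apply hfound
          cases rs with
          | nil => exact absurd rfl hane
          | cons r0 rs0 =>
            rw [List.dropLast_cons_of_ne_nil (by simp)]
            exact List.mem_cons_self
        have hlt : pvStart edges a ≤ edges.length :=
          Nat.le_of_lt (List.findIdx_lt_length.mpr (by simpa [pvStart] using ha))
        rw [PySem.List.foldl_congr_mem rs _ (fun t b => t + a * b * pvMiss edges a b) total
          (by
            intro acc b hb
            have hbq : b ∈ queries := hsub' b hb
            have hsuf : (pvSufB edges queries).getD b [] = pvCountsB edges b := by
              unfold pvSufB PySem.Dict.getD
              rw [suf_get]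
              simp [PySem.Set.mem_ofList, hbq]
            rw [hsuf, firstB_found edges a ha]
            rw [show (Int.ofNat (pvStart edges a)) = ((pvStart edges a : Nat) : Int) from rfl]
            rw [PySem.List.pyGet?_natCast]
            have : (pvCountsB edges b)[pvStart edges a]?.getD 0
                = (pvCountsB edges b).getD (pvStart edges a) 0 := by
              simp [List.getD_eq_getElem?_getD]
            rw [this, counts_getD edges b _ hlt]
            rfl)]
        exact foldl_add_int (fun b => a * b * pvMiss edges a b) rs total
    rw [hstep, ih _ hsub' hfound']
    simp [pvSpecSum]
    ring

-- ===== VERDICT (by name: the statement is the Claim_ definition above) =====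
theorem kittys_calculation_spec : Claim_equal_kittys_calculation := by
  intro edges queries _ hpre
  unfold Spec_kittys_calculation kittys_calculation kittys_calculation_alt
  rw [A_eq_spec edges queries 0 hpre,
      loopB_eq edges queries hpre queries 0 (fun x hx => hx) hpre]
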